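-- pv_equiv track=rewrite | github.com/AbhinavMangalore16/leetcode-solutions | 3611-ConstructTheMinimumBitwiseArrayIi/3611-ConstructTheMinimumBitwiseArrayIi.py | _calc
-- ===== SOURCE A (Python) =====
-- def _calc(value):
--     bits_on_right = 0
--     v = value
--     while (v & 1) != 0:
--         bits_on_right += 1
--         v >>= 1
--     if bits_on_right == 1:
--         return value - 1
--     wo_bits_on_right = value ^ ((1 << bits_on_right) - 1)
--     return wo_bits_on_right | ((1 << (bits_on_right - 1)) - 1)
-- ===== SOURCE B (Python) =====
-- def _calc(value):
--     # closed form: isolate the lowest zero bit of value (= 2**k), then clear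
--     # bit k-1, the highest trailing-one bit; on even input k = 0 and
--     # 1 << (k - 1) raises ValueError, as the loop-free form's natural domain is odd input
--     k = (~value & (value + 1)).bit_length() - 1
--     return value & ~(1 << (k - 1))
-- ===== Notes on version B (the rewrite author's own statement) =====
-- stated objective: idiomatic
-- what changed: Replaces A's trailing-one counting while-loop plus XOR/OR mask reconstruction by a loop-free closed form: isolate the lowest zero bit with ~value & (value+1), take its position via bit_length, and clear the bit below it with value & ~(1 << (k-1)).
-- outside the precondition, e.g. on _calc(0): A raises ValueError, B raises ValueError; on _calc(-1): A does not finish within the time limit, B raises ValueError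
import Mathlib
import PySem

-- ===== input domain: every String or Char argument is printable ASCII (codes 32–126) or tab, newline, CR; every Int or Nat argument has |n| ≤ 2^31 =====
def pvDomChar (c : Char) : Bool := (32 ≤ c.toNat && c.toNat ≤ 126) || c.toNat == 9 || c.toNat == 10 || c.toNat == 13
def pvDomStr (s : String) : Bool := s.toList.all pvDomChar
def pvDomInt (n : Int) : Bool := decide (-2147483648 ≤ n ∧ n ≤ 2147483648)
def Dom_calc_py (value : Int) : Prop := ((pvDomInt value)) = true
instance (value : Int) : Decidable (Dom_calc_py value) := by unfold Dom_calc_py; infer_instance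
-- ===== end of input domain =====

-- B replaces A's trailing-one counting loop and XOR/OR reconstruction by a closed form:
-- isolate the lowest zero bit with ~value & (value+1), then clear the bit just below it.

-- ===== PORT A =====
-- A's while loop; fuel 64 covers every input admitted by Pre_ inside Dom
-- (a value in [-2^31, 2^31] other than -1 has at most 32 trailing one bits)
def calcLoop : Nat → Nat → Int → Nat
  | 0, bits, _ => bits
  | fuel+1, bits, v =>
      if PySem.Int.band v 1 ≠ 0 then calcLoop fuel (bits+1) (v >>> (1:Nat)) else bits

def calc_py (value : Int) : Int :=
  let bits := calcLoop 64 0 value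
  if bits = 1 then value - 1
  else
    -- Python raises ValueError below when bits = 0 (1 << -1); Pre_ excludes even values
    let wo := PySem.Int.bxor value (((1 : Int) <<< bits) - 1)
    PySem.Int.bor wo (((1 : Int) <<< (bits - 1)) - 1)

-- ===== PORT B =====
def calc_py_alt (value : Int) : Int :=
  let k : Int := (PySem.Int.bitLength (PySem.Int.band (Int.not value) (value + 1)) : Int) - 1
  -- (k-1).toNat is exact for k ≥ 1; for k ≤ 0 (even input or -1) Python raises
  -- ValueError on the negative shift, which Pre_ excludes
  PySem.Int.band value (Int.not ((1 : Int) <<< (k - 1).toNat))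

-- ===== PRECONDITION & SPEC =====
-- Pre_ excludes even values, on which A raises ValueError (1 << -1), and -1, on which
-- A's while loop never terminates; B raises ValueError on both. A returns on every other Int.
def Pre_calc_py (value : Int) : Prop := PySem.Int.mod value 2 = 1 ∧ value ≠ -1
instance (value : Int) : Decidable (Pre_calc_py value) := by unfold Pre_calc_py; infer_instance
def pvWitness_calc_py : Int := (7)

def Spec_calc_py (value : Int) (out : Int) : Prop := out = calc_py_alt value
instance (value : Int) (out : Int) : Decidable (Spec_calc_py value out) := by unfold Spec_calc_py; infer_instance

-- ===== CLAIM (what is proved, stated in full; the proofs are below) =====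
def Claim_equal_calc_py : Prop := ∀ (value : Int), Dom_calc_py value → Pre_calc_py value → Spec_calc_py value (calc_py value)

-- ===== LEMMAS AND PROOFS =====

-- Nat halving identities for the bitwise operations
theorem nh_and (A B X Y : Nat) (hX : X ≤ 1) (hY : Y ≤ 1) :
    (2*A+X) &&& (2*B+Y) = 2*(A &&& B) + X*Y := by
  interval_cases X <;> interval_cases Y <;>
    [ (have := Nat.land_bit false A false B);
      (have := Nat.land_bit false A true B);
      (have := Nat.land_bit true A false B);
      (have := Nat.land_bit true A true B)] <;>
    simp [Nat.bit_val] at this <;> omega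

theorem nh_or (A B X Y : Nat) (hX : X ≤ 1) (hY : Y ≤ 1) :
    (2*A+X) ||| (2*B+Y) = 2*(A ||| B) + (X + Y - X*Y) := by
  interval_cases X <;> interval_cases Y <;>
    [ (have := Nat.lor_bit false A false B);
      (have := Nat.lor_bit false A true B);
      (have := Nat.lor_bit true A false B);
      (have := Nat.lor_bit true A true B)] <;>
    simp [Nat.bit_val] at this <;> omega

theorem nh_xor (A B X Y : Nat) (hX : X ≤ 1) (hY : Y ≤ 1) :
    (2*A+X) ^^^ (2*B+Y) = 2*(A ^^^ B) + (X + Y - 2*(X*Y)) := by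
  interval_cases X <;> interval_cases Y <;>
    [ (have := Nat.xor_bit false A false B);
      (have := Nat.xor_bit false A true B);
      (have := Nat.xor_bit true A false B);
      (have := Nat.xor_bit true A true B)] <;>
    simp [Nat.bit_val] at this <;> omega

-- Int halving identities for PySem's Python-exact bitwise operations, by sign cases
theorem ih_band_pp (a b x y : Int) (hx01 : x = 0 ∨ x = 1) (hy01 : y = 0 ∨ y = 1)
    (ha : 0 ≤ a) (hb : 0 ≤ b) :
    PySem.Int.band (2*a+x) (2*b+y) = 2 * PySem.Int.band a b + x*y := by
  have hx : 0 ≤ x ∧ x ≤ 1 := by rcases hx01 with rfl|rfl <;> omega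
  have hy : 0 ≤ y ∧ y ≤ 1 := by rcases hy01 with rfl|rfl <;> omega
  have hp1 : x * y = ↑(x.toNat * y.toNat) := by
    rcases hx01 with rfl|rfl <;> rcases hy01 with rfl|rfl <;> norm_num
  simp only [PySem.Int.band]
  split_ifs <;> try omega
  rw [show (2*a+x).toNat = 2*a.toNat + x.toNat from by omega,
      show (2*b+y).toNat = 2*b.toNat + y.toNat from by omega,
      nh_and _ _ _ _ (by omega) (by omega)]
  omega

theorem ih_band_pn (a b x y : Int) (hx01 : x = 0 ∨ x = 1) (hy01 : y = 0 ∨ y = 1)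
    (ha : 0 ≤ a) (hb : b < 0) :
    PySem.Int.band (2*a+x) (2*b+y) = 2 * PySem.Int.band a b + x*y := by
  have hx : 0 ≤ x ∧ x ≤ 1 := by rcases hx01 with rfl|rfl <;> omega
  have hy : 0 ≤ y ∧ y ≤ 1 := by rcases hy01 with rfl|rfl <;> omega
  have hp1 : x * y = ↑(x.toNat * y.toNat) := by
    rcases hx01 with rfl|rfl <;> rcases hy01 with rfl|rfl <;> norm_num
  have hp2 : x.toNat * (1-y).toNat + x.toNat * y.toNat = x.toNat := by
    rcases hx01 with rfl|rfl <;> rcases hy01 with rfl|rfl <;> norm_num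
  simp only [PySem.Int.band]
  split_ifs <;> try omega
  rw [show (2*a+x).toNat = 2*a.toNat + x.toNat from by omega,
      show (-(2*b+y)-1).toNat = 2*(-b-1).toNat + (1-y).toNat from by omega,
      nh_and _ _ _ _ (by omega) (by omega)]
  have h1 := Nat.and_le_left (n := a.toNat) (m := (-b-1).toNat)
  omega

theorem ih_band_nn (a b x y : Int) (hx01 : x = 0 ∨ x = 1) (hy01 : y = 0 ∨ y = 1)
    (ha : a < 0) (hb : b < 0) :
    PySem.Int.band (2*a+x) (2*b+y) = 2 * PySem.Int.band a b + x*y := by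
  have hx : 0 ≤ x ∧ x ≤ 1 := by rcases hx01 with rfl|rfl <;> omega
  have hy : 0 ≤ y ∧ y ≤ 1 := by rcases hy01 with rfl|rfl <;> omega
  have hp1 : x * y = ↑(x.toNat * y.toNat) := by
    rcases hx01 with rfl|rfl <;> rcases hy01 with rfl|rfl <;> norm_num
  have hp3 : (1-x).toNat + (1-y).toNat - (1-x).toNat*(1-y).toNat + x.toNat*y.toNat = 1 := by
    rcases hx01 with rfl|rfl <;> rcases hy01 with rfl|rfl <;> norm_num
  have hp4 : (1-x).toNat*(1-y).toNat ≤ (1-x).toNat + (1-y).toNat := by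
    rcases hx01 with rfl|rfl <;> rcases hy01 with rfl|rfl <;> norm_num
  simp only [PySem.Int.band]
  split_ifs <;> try omega
  rw [show (-(2*a+x)-1).toNat = 2*(-a-1).toNat + (1-x).toNat from by omega,
      show (-(2*b+y)-1).toNat = 2*(-b-1).toNat + (1-y).toNat from by omega,
      nh_or _ _ _ _ (by omega) (by omega)]
  omega

theorem ih_band (a b x y : Int) (hx01 : x = 0 ∨ x = 1) (hy01 : y = 0 ∨ y = 1) :
    PySem.Int.band (2*a+x) (2*b+y) = 2 * PySem.Int.band a b + x*y := by
  rcases lt_or_ge b 0 with hb | hb <;> rcases lt_or_ge a 0 with ha | ha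
  · exact ih_band_nn a b x y hx01 hy01 ha hb
  · exact ih_band_pn a b x y hx01 hy01 ha hb
  · rw [PySem.Int.band_comm, PySem.Int.band_comm a b, mul_comm x y]
    exact ih_band_pn b a y x hy01 hx01 hb ha
  · exact ih_band_pp a b x y hx01 hy01 ha hb

theorem ih_bor (a b x y : Int) (hx01 : x = 0 ∨ x = 1) (hy01 : y = 0 ∨ y = 1)
    (hb : 0 ≤ b) :
    PySem.Int.bor (2*a+x) (2*b+y) = 2 * PySem.Int.bor a b + (x + y - x*y) := by
  have hx : 0 ≤ x ∧ x ≤ 1 := by rcases hx01 with rfl|rfl <;> omega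
  have hy : 0 ≤ y ∧ y ≤ 1 := by rcases hy01 with rfl|rfl <;> omega
  have hp1 : x * y = ↑(x.toNat * y.toNat) := by
    rcases hx01 with rfl|rfl <;> rcases hy01 with rfl|rfl <;> norm_num
  have hp5 : x.toNat * y.toNat ≤ y.toNat := by
    rcases hx01 with rfl|rfl <;> rcases hy01 with rfl|rfl <;> norm_num
  rcases lt_or_ge a 0 with ha | ha
  case inr =>
    simp only [PySem.Int.bor]
    split_ifs <;> try omega
    rw [show (2*a+x).toNat = 2*a.toNat + x.toNat from by omega,
        show (2*b+y).toNat = 2*b.toNat + y.toNat from by omega,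
        nh_or _ _ _ _ (by omega) (by omega)]
    omega
  case inl =>
    have hq : (1-x).toNat * y.toNat + x.toNat * y.toNat = y.toNat := by
      rcases hx01 with rfl|rfl <;> rcases hy01 with rfl|rfl <;> norm_num
    have hq2 : (1-x).toNat * y.toNat ≤ (1-x).toNat := by
      rcases hx01 with rfl|rfl <;> rcases hy01 with rfl|rfl <;> norm_num
    simp only [PySem.Int.bor]
    split_ifs <;> try omega
    rw [show (-(2*a+x)-1).toNat = 2*(-a-1).toNat + (1-x).toNat from by omega,
        show (2*b+y).toNat = 2*b.toNat + y.toNat from by omega,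
        nh_and _ _ _ _ (by omega) (by omega)]
    have h1 := Nat.and_le_left (n := (-a-1).toNat) (m := b.toNat)
    omega

theorem ih_bxor (a b x y : Int) (hx01 : x = 0 ∨ x = 1) (hy01 : y = 0 ∨ y = 1)
    (hb : 0 ≤ b) :
    PySem.Int.bxor (2*a+x) (2*b+y) = 2 * PySem.Int.bxor a b + (x + y - 2*(x*y)) := by
  have hx : 0 ≤ x ∧ x ≤ 1 := by rcases hx01 with rfl|rfl <;> omega
  have hy : 0 ≤ y ∧ y ≤ 1 := by rcases hy01 with rfl|rfl <;> omega
  have hp1 : x * y = ↑(x.toNat * y.toNat) := by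
    rcases hx01 with rfl|rfl <;> rcases hy01 with rfl|rfl <;> norm_num
  have hp6 : 2*(x.toNat * y.toNat) ≤ x.toNat + y.toNat := by
    rcases hx01 with rfl|rfl <;> rcases hy01 with rfl|rfl <;> norm_num
  rcases lt_or_ge a 0 with ha | ha
  case inr =>
    simp only [PySem.Int.bxor]
    split_ifs <;> try omega
    rw [show (2*a+x).toNat = 2*a.toNat + x.toNat from by omega,
        show (2*b+y).toNat = 2*b.toNat + y.toNat from by omega,
        nh_xor _ _ _ _ (by omega) (by omega)]
    omega
  case inl =>
    have hq : (1-x).toNat * y.toNat + x.toNat * y.toNat = y.toNat := by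
      rcases hx01 with rfl|rfl <;> rcases hy01 with rfl|rfl <;> norm_num
    have hq2 : (1-x).toNat * y.toNat ≤ (1-x).toNat := by
      rcases hx01 with rfl|rfl <;> rcases hy01 with rfl|rfl <;> norm_num
    simp only [PySem.Int.bxor]
    split_ifs <;> try omega
    rw [show (-(2*a+x)-1).toNat = 2*(-a-1).toNat + (1-x).toNat from by omega,
        show (2*b+y).toNat = 2*b.toNat + y.toNat from by omega,
        nh_xor _ _ _ _ (by omega) (by omega)]
    omega

theorem int_not_eq (a : Int) : Int.not a = -a - 1 := by
  rcases a with n | n <;> simp [Int.not, Int.negSucc_eq] <;> ring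

theorem mod2_eq (v : Int) : PySem.Int.mod v 2 = v % 2 := by
  simp [PySem.Int.mod, Int.fmod_eq_emod]

theorem one_shl (n : Nat) : (1:Int) <<< n = 2^n := by
  rw [Int.shiftLeft_eq]; norm_num

theorem shr_one (w : Int) : (2*w+1) >>> (1:Nat) = w := by
  rw [Int.shiftRight_eq_div_pow]; omega

-- `e & ~e = 0` at the PySem level
theorem band_not_self (e : Int) : PySem.Int.band (-e-1) e = 0 := by
  rcases lt_or_ge e 0 with he | he
  · simp only [PySem.Int.band]
    split_ifs <;> try omega
    rw [show (-e-1).toNat &&& (-e-1).toNat = (-e-1).toNat from Nat.and_self _]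
    omega
  · simp only [PySem.Int.band]
    split_ifs <;> try omega
    rw [show (-(-e-1)-1).toNat = e.toNat from by omega, Nat.and_self]
    omega

-- L1: XOR with the all-ones mask clears the trailing ones
theorem bxor_trailing (n : Nat) (c : Int) :
    PySem.Int.bxor (c*2^(n+1) + (2^n - 1)) ((2:Int)^n - 1) = c*2^(n+1) := by
  induction n generalizing c with
  | zero => norm_num [PySem.Int.bxor_zero]
  | succ n ih =>
      rw [show c*2^(n+2) + ((2:Int)^(n+1) - 1) = 2*(c*2^(n+1) + (2^n - 1)) + 1 from by ring,
          show (2:Int)^(n+1) - 1 = 2*(2^n - 1) + 1 from by ring,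
          ih_bxor _ _ _ _ (Or.inr rfl) (Or.inr rfl)
            (by have h := pow_pos (show (0:Int) < 2 from by norm_num) n; omega),
          ih]
      ring

-- L2: OR into cleared low bits is addition
theorem bor_low (k : Nat) (j : Nat) (c : Int) (hkj : k ≤ j) :
    PySem.Int.bor (c*2^j) ((2:Int)^k - 1) = c*2^j + (2^k - 1) := by
  induction k generalizing j c with
  | zero => norm_num [PySem.Int.bor_zero]
  | succ k ih =>
      obtain ⟨j', rfl⟩ : ∃ j', j = j'+1 := ⟨j-1, by omega⟩
      rw [show c*2^(j'+1) = 2*(c*2^j') + 0 from by ring,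
          show (2:Int)^(k+1) - 1 = 2*(2^k - 1) + 1 from by ring,
          ih_bor _ _ _ _ (Or.inl rfl) (Or.inr rfl)
            (by have h := pow_pos (show (0:Int) < 2 from by norm_num) k; omega),
          ih j' c (by omega)]
      ring

-- L3: d odd → (-(d·2^n)) & (d·2^n) = 2^n (lowest set bit)
theorem band_lowbit (n : Nat) (d : Int) (hd : d % 2 = 1) :
    PySem.Int.band (-(d*2^n)) (d*2^n) = (2:Int)^n := by
  induction n with
  | zero =>
      obtain ⟨e, rfl⟩ : ∃ e, d = 2*e + 1 := ⟨d/2, by omega⟩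
      rw [show -((2*e+1)*2^0) = 2*(-e-1) + 1 from by ring,
          show (2*e+1)*2^0 = 2*e + 1 from by ring,
          ih_band _ _ _ _ (Or.inr rfl) (Or.inr rfl),
          band_not_self]
      norm_num
  | succ n ih =>
      rw [show -(d*2^(n+1)) = 2*(-(d*2^n)) + 0 from by ring,
          show d*2^(n+1) = 2*(d*2^n) + 0 from by ring,
          ih_band _ _ _ _ (Or.inl rfl) (Or.inl rfl),
          ih]
      ring

-- L4: bit_length(2^n) = n+1
theorem bl_pow (n : Nat) : PySem.Int.bitLength ((2:Int)^n) = n + 1 := by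
  induction n with
  | zero => decide
  | succ n ih =>
      rw [PySem.Int.bitLength_of_pos (by positivity),
          show PySem.Int.floordiv ((2:Int)^(n+1)) 2 = 2^n from by
            rw [PySem.Int.floordiv_eq_iff_of_pos (by norm_num)]
            have : (0:Int) < 2^n := by positivity
            constructor
            · rw [show (2:Int)^n*2 = 2^(n+1) from by ring]
            · rw [show ((2:Int)^n+1)*2 = 2^(n+1)+2 from by ring]; omega,
          ih]

-- L5: clearing a set bit subtracts it
theorem band_clear (m : Nat) (c r : Int) (h0 : 0 ≤ r) (h1 : r < 2^m) :
    PySem.Int.band (c*2^(m+1) + (2^m + r)) (-(2:Int)^m - 1) = c*2^(m+1) + r := by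
  induction m generalizing c r with
  | zero =>
      have : r = 0 := by omega
      subst this
      rw [show c*2^(0+1) + ((2:Int)^0 + 0) = 2*c + 1 from by ring,
          show -(2:Int)^0 - 1 = 2*(-1) + 0 from by ring,
          ih_band _ _ _ _ (Or.inr rfl) (Or.inl rfl),
          PySem.Int.band_neg_one]
      ring
  | succ m ih =>
      obtain ⟨r', s, hs, rfl⟩ : ∃ r' s, (s = 0 ∨ s = 1) ∧ r = 2*r' + s :=
        ⟨r/2, r%2, by omega, by omega⟩
      have hp : (2:Int)^(m+1) = 2*2^m := by ring
      rw [show c*2^(m+1+1) + ((2:Int)^(m+1) + (2*r'+s)) = 2*(c*2^(m+1) + (2^m + r')) + s from by ring,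
          show -(2:Int)^(m+1) - 1 = 2*(-(2:Int)^m - 1) + 1 from by ring,
          ih_band _ _ _ _ hs (Or.inr rfl),
          ih c r' (by omega) (by omega)]
      ring

-- L6: the loop counts the trailing ones
theorem loop_eq (n : Nat) : ∀ (c : Int) (fuel bits : Nat), n + 1 ≤ fuel →
    calcLoop fuel bits (c*2^(n+1) + (2^n - 1)) = bits + n := by
  induction n with
  | zero =>
      intro c fuel bits hf
      obtain ⟨f, rfl⟩ : ∃ f, fuel = f+1 := ⟨fuel-1, by omega⟩
      rw [show c*2^(0+1) + ((2:Int)^0 - 1) = 2*c from by ring]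
      simp only [calcLoop, PySem.Int.band_one, mod2_eq]
      rw [if_neg (by omega)]
      rfl
  | succ n ih =>
      intro c fuel bits hf
      obtain ⟨f, rfl⟩ : ∃ f, fuel = f+1 := ⟨fuel-1, by omega⟩
      rw [show c*2^(n+1+1) + ((2:Int)^(n+1) - 1) = 2*(c*2^(n+1) + (2^n - 1)) + 1 from by ring]
      simp only [calcLoop, PySem.Int.band_one, mod2_eq]
      rw [if_pos (by omega), shr_one, ih c f (bits+1) (by omega)]
      omega

-- L7: every odd value ≠ -1 has a trailing-ones decomposition
theorem ex_trail (k : Nat) : ∀ (v : Int), v % 2 = 1 → v ≠ -1 → v.natAbs ≤ 2^k →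
    ∃ (n : Nat) (c : Int), 1 ≤ n ∧ n ≤ k+1 ∧ v = c*2^(n+1) + (2^n - 1) := by
  induction k with
  | zero =>
      intro v h1 h2 h3
      have : v = 1 := by omega
      exact ⟨1, 0, le_refl _, by omega, by subst this; norm_num⟩
  | succ k ih =>
      intro v h1 h2 h3
      obtain ⟨w, rfl⟩ : ∃ w, v = 2*w + 1 := ⟨v/2, by omega⟩
      by_cases hw : w % 2 = 1
      · have hw1 : w ≠ -1 := by omega
        have h2k : (2:Nat)^(k+1) = 2*2^k := by ring
        have hwb : w.natAbs ≤ 2^k := by omega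
        obtain ⟨n, c, hn1, hn2, hc⟩ := ih w hw hw1 hwb
        exact ⟨n+1, c, by omega, by omega, by rw [hc]; ring⟩
      · obtain ⟨e, rfl⟩ : ∃ e, w = 2*e := ⟨w/2, by omega⟩
        exact ⟨1, e, le_refl _, by omega, by ring⟩

-- A's value on a decomposed input
theorem calc_py_eq (m : Nat) (c : Int) (hf : m + 2 ≤ 64) :
    calc_py (c*2^(m+1+1) + ((2:Int)^(m+1) - 1)) = c*2^(m+1+1) + (2^m - 1) := by
  simp only [calc_py]
  rw [loop_eq (m+1) c 64 0 (by omega)]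
  simp only [Nat.zero_add]
  by_cases hm : m = 0
  · subst hm
    rw [if_pos rfl]
    ring
  · rw [if_neg (by omega)]
    rw [show m+1-1 = m from by omega, one_shl, one_shl,
        bxor_trailing (m+1) c,
        bor_low m (m+1+1) c (by omega)]

-- B's value on a decomposed input
theorem calc_py_alt_eq (m : Nat) (c : Int) :
    calc_py_alt (c*2^(m+1+1) + ((2:Int)^(m+1) - 1)) = c*2^(m+1+1) + (2^m - 1) := by
  simp only [calc_py_alt, int_not_eq]
  rw [show -(c*2^(m+1+1) + ((2:Int)^(m+1) - 1)) - 1 = -((2*c+1)*2^(m+1)) from by ring,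
      show c*2^(m+1+1) + ((2:Int)^(m+1) - 1) + 1 = (2*c+1)*2^(m+1) from by ring,
      band_lowbit (m+1) (2*c+1) (by omega),
      bl_pow (m+1)]
  rw [show ((((m+1+1 : Nat)) : Int) - 1 - 1).toNat = m from by omega, one_shl,
      show -((2:Int)^m) - 1 = -(2:Int)^m - 1 from by ring]
  rw [show c*2^(m+1+1) + ((2:Int)^(m+1) - 1) = (2*c)*2^(m+1) + (2^m + (2^m - 1)) from by ring,
      band_clear m (2*c) (2^m - 1) (by have h := pow_pos (show (0:Int) < 2 from by norm_num) m; omega)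
        (by have h := pow_pos (show (0:Int) < 2 from by norm_num) m; omega)]
  ring

-- ===== VERDICT (by name: the statement is the Claim_ definition above) =====
theorem calc_py_spec : Claim_equal_calc_py := by
  intro value hdom hpre
  unfold Spec_calc_py
  obtain ⟨hodd, hne⟩ := hpre
  rw [mod2_eq] at hodd
  have hdom' : -2147483648 ≤ value ∧ value ≤ 2147483648 := by
    simpa [Dom_calc_py, pvDomInt] using hdom
  have habs : value.natAbs ≤ 2^31 := by norm_num; omega
  obtain ⟨n, c, hn1, hn2, hc⟩ := ex_trail 31 value hodd hne habs
  obtain ⟨m, rfl⟩ : ∃ m, n = m+1 := ⟨n-1, by omega⟩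
  rw [hc, calc_py_eq m c (by omega), calc_py_alt_eq m c]
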